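-- pv_equiv track=rewrite | github.com/htang7415/Max-Handbook | modules/dsa/string/151-reverse-words-in-a-string/python/reverse_words_in_a_string.py | _compact_spaces
-- ===== SOURCE A (Python) =====
-- def _compact_spaces(chars: list[str]) -> int:
--     write = 0
--     read = 0
--     n = len(chars)
--
--     while read < n:
--         while read < n and chars[read] == " ":
--             read += 1
--
--         while read < n and chars[read] != " ":
--             chars[write] = chars[read]
--             write += 1
--             read += 1
--
--         while read < n and chars[read] == " ":
--             read += 1
--
--         if read < n:
--             chars[write] = " "
--             write += 1
--
--     return write
-- ===== SOURCE B (Python) =====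
-- def _compact_spaces(chars: list[str]) -> int:
--     # Pure single-pass count: returns the same value as the two-pointer writer,
--     # without mutating chars (A compacts in place; equivalence is on the return value).
--     total = 0
--     groups = 0
--     prev_space = True
--     for c in chars:
--         if c != " ":
--             total += 1
--             if prev_space:
--                 groups += 1
--             prev_space = False
--         else:
--             prev_space = True
--     return total + (groups - 1 if groups else 0)
-- ===== Notes on version B (the rewrite author's own statement) =====
-- stated objective: simpler
-- what changed: Replaces the in-place two-pointer compaction (nested while loops, write/read indices, list mutation) with a pure single left-to-right pass that counts non-space elements and word groups and returns total + max(groups-1, 0); B does not mutate chars (A does; the equivalence is about the return value).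
import Mathlib
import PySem

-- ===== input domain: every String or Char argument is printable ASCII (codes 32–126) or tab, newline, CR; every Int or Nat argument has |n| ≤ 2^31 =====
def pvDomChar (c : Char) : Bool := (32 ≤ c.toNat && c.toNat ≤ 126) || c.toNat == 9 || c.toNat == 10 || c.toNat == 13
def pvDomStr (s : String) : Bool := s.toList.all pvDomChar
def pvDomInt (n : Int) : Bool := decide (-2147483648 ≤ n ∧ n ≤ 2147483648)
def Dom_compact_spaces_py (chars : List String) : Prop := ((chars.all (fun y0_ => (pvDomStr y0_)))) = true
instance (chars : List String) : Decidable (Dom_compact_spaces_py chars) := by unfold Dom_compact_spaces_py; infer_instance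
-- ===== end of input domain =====

-- B replaces A's in-place two-pointer compaction by a pure one-pass count; A mutates
-- chars in place and B does not, so the equivalence proved here is about the RETURN
-- value only.  (A's writes land at index write ≤ read and read only moves forward, so
-- the mutation never feeds back into the returned value; the port therefore carries
-- only the two indices — it is exact for the return value.)

-- ===== PORT A =====
-- inner loop `while read < n and chars[read] == " ": read += 1`
-- (fuel = n - read bounds the remaining iterations; it only makes the recursion structural)
def pvSkipSpGo (chars : List String) : Nat → Nat → Nat
  | 0, read => read
  | fuel + 1, read =>
      if h : read < chars.length then
        if chars[read] = " " then pvSkipSpGo chars fuel (read + 1) else read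
      else read

def pvSkipSp (chars : List String) (read : Nat) : Nat :=
  pvSkipSpGo chars (chars.length - read) read

-- inner loop `while read < n and chars[read] != " ": chars[write]=chars[read]; write+=1; read+=1`
-- (the write is dropped: it never affects a later read, see header comment)
def pvCopyWordGo (chars : List String) : Nat → Nat → Nat → Nat × Nat
  | 0, write, read => (write, read)
  | fuel + 1, write, read =>
      if h : read < chars.length then
        if chars[read] ≠ " " then pvCopyWordGo chars fuel (write + 1) (read + 1)
        else (write, read)
      else (write, read)

def pvCopyWord (chars : List String) (write read : Nat) : Nat × Nat :=
  pvCopyWordGo chars (chars.length - read) write read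

-- outer `while read < n` loop; returns write (fuel = n - read again bounds the iterations)
def pvLoopGo (chars : List String) : Nat → Nat → Nat → Nat
  | 0, write, _ => write
  | fuel + 1, write, read =>
      if read < chars.length then
        let r1 := pvSkipSp chars read
        let wr := pvCopyWord chars write r1
        let r3 := pvSkipSp chars wr.2
        if r3 < chars.length then pvLoopGo chars fuel (wr.1 + 1) r3
        else pvLoopGo chars fuel wr.1 r3
      else write

def compact_spaces_py (chars : List String) : Int :=
  (pvLoopGo chars chars.length 0 0 : Nat)

-- ===== PORT B =====
-- one step of B's for-loop over the state (total, groups, prev_space)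
def pvStep (st : Nat × Nat × Bool) (c : String) : Nat × Nat × Bool :=
  if c ≠ " " then (st.1 + 1, (if st.2.2 then st.2.1 + 1 else st.2.1), false)
  else (st.1, st.2.1, true)

def compact_spaces_py_alt (chars : List String) : Int :=
  let st := chars.foldl pvStep (0, 0, true)
  (st.1 : Int) + (if st.2.1 ≠ 0 then (st.2.1 : Int) - 1 else 0)

-- ===== PRECONDITION & SPEC =====
def Spec_compact_spaces_py (chars : List String) (out : Int) : Prop := out = compact_spaces_py_alt chars
instance (chars : List String) (out : Int) : Decidable (Spec_compact_spaces_py chars out) := by unfold Spec_compact_spaces_py; infer_instance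

-- ===== CLAIM (what is proved, stated in full; the proofs are below) =====
def Claim_equal_compact_spaces_py : Prop := ∀ (chars : List String), Dom_compact_spaces_py chars → Spec_compact_spaces_py chars (compact_spaces_py chars)

-- ===== LEMMAS AND PROOFS =====

def pvIsSp (c : String) : Bool := c == " "

-- Nat-valued version of B's result
def pvBcnt (l : List String) : Nat :=
  let st := l.foldl pvStep (0, 0, true)
  st.1 + (st.2.1 - 1)

theorem pvAlt_eq_Bcnt (chars : List String) :
    compact_spaces_py_alt chars = (pvBcnt chars : Int) := by
  unfold compact_spaces_py_alt pvBcnt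
  rcases h : chars.foldl pvStep (0, 0, true) with ⟨t, g, p⟩
  by_cases hg : g = 0 <;> simp [hg] <;> push_cast <;> omega

-- dropping a suffix index commutes with the skip-spaces loop
theorem pvSkipSpGo_drop (chars : List String) (fuel read : Nat)
    (hf : chars.length - read ≤ fuel) :
    chars.drop (pvSkipSpGo chars fuel read) = (chars.drop read).dropWhile pvIsSp := by
  induction fuel generalizing read with
  | zero =>
      have : chars.drop read = [] := List.drop_eq_nil_of_le (by omega)
      simp [pvSkipSpGo, this]
  | succ fuel ih =>
      rw [pvSkipSpGo]
      by_cases h : read < chars.length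
      · by_cases hsp : chars[read] = " "
        · have hb : pvIsSp chars[read] = true := by simp [pvIsSp, hsp]
          rw [dif_pos h, if_pos hsp, ih (read + 1) (by omega),
            List.drop_eq_getElem_cons h, List.dropWhile_cons, if_pos hb]
        · have hb : pvIsSp chars[read] = false := by simp [pvIsSp, hsp]
          rw [dif_pos h, if_neg hsp,
            show (chars.drop read).dropWhile pvIsSp
                = (chars[read] :: chars.drop (read + 1)).dropWhile pvIsSp from by
              rw [List.drop_eq_getElem_cons h],
            List.dropWhile_cons, if_neg (by simp [hb])]
          exact List.drop_eq_getElem_cons h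
      · have : chars.drop read = [] := List.drop_eq_nil_of_le (by omega)
        simp [h, this]

theorem pvSkipSp_drop (chars : List String) (read : Nat) :
    chars.drop (pvSkipSp chars read) = (chars.drop read).dropWhile pvIsSp :=
  pvSkipSpGo_drop chars _ read (Nat.le_refl _)

theorem pvCopyWordGo_eq (chars : List String) (fuel w read : Nat)
    (hf : chars.length - read ≤ fuel) :
    pvCopyWordGo chars fuel w read =
      (w + ((chars.drop read).takeWhile (fun c => !pvIsSp c)).length,
       read + ((chars.drop read).takeWhile (fun c => !pvIsSp c)).length) := by
  induction fuel generalizing w read with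
  | zero =>
      have : chars.drop read = [] := List.drop_eq_nil_of_le (by omega)
      simp [pvCopyWordGo, this]
  | succ fuel ih =>
      rw [pvCopyWordGo]
      by_cases h : read < chars.length
      · rw [List.drop_eq_getElem_cons h, List.takeWhile_cons]
        by_cases hsp : chars[read] = " "
        · have hb : pvIsSp chars[read] = true := by simp [pvIsSp, hsp]
          rw [dif_pos h, if_neg (by simp [hsp])]
          simp [hb]
        · have hb : pvIsSp chars[read] = false := by simp [pvIsSp, hsp]
          rw [dif_pos h, if_pos hsp, ih (w + 1) (read + 1) (by omega)]
          simp [hb, Prod.mk.injEq]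
          omega
      · have : chars.drop read = [] := List.drop_eq_nil_of_le (by omega)
        simp [h, this]

theorem pvCopyWord_eq (chars : List String) (w read : Nat) :
    pvCopyWord chars w read =
      (w + ((chars.drop read).takeWhile (fun c => !pvIsSp c)).length,
       read + ((chars.drop read).takeWhile (fun c => !pvIsSp c)).length) :=
  pvCopyWordGo_eq chars _ w read (Nat.le_refl _)

theorem pvDrop_len_takeWhile {α : Type} (p : α → Bool) (l : List α) :
    l.drop (l.takeWhile p).length = l.dropWhile p := by
  induction l with
  | nil => simp
  | cons c t ih =>
      rw [List.takeWhile_cons, List.dropWhile_cons]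
      by_cases hc : p c = true <;> simp [hc, ih]

-- ---- facts about B's fold ----

theorem pvFold_shift (l : List String) (a b t g : Nat) (p : Bool) :
    l.foldl pvStep (a + t, b + g, p) =
      ((l.foldl pvStep (t, g, p)).1 + a, (l.foldl pvStep (t, g, p)).2.1 + b,
       (l.foldl pvStep (t, g, p)).2.2) := by
  induction l generalizing t g p with
  | nil => simp; omega
  | cons c rest ih =>
      simp only [List.foldl_cons, pvStep]
      by_cases hc : c = " "
      · simp [hc, ih]
      · cases p <;> simp only [hc, ne_eq, not_false_iff, if_true, if_neg, ite_false, ite_true]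
        · have := ih (t + 1) g false
          simpa [Nat.add_assoc, Nat.add_comm 1] using this
        · have := ih (t + 1) (g + 1) false
          simpa [Nat.add_assoc, Nat.add_comm 1] using this

theorem pvFold_g_mono (l : List String) (t g : Nat) (p : Bool) :
    g ≤ (l.foldl pvStep (t, g, p)).2.1 := by
  induction l generalizing t g p with
  | nil => simp
  | cons c rest ih =>
      simp only [List.foldl_cons, pvStep]
      by_cases hc : c = " "
      · simp only [hc, ite_true, if_neg, not_true, ne_eq, not_false_iff]
        simpa using ih t g true
      · cases p <;> simp only [hc, ne_eq, not_false_iff, if_true, ite_true, ite_false]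
        · exact ih (t + 1) g false
        · exact le_trans (Nat.le_succ g) (ih (t + 1) (g + 1) false)

-- leading spaces are absorbed from a prev_space=true state
theorem pvFold_dropSp (l : List String) (t g : Nat) :
    l.foldl pvStep (t, g, true) = (l.dropWhile pvIsSp).foldl pvStep (t, g, true) := by
  induction l with
  | nil => simp
  | cons c rest ih =>
      by_cases hc : c = " "
      · rw [List.dropWhile_cons]
        simp only [List.foldl_cons, pvStep, hc]
        simp [pvIsSp, hc, ih]
      · rw [List.dropWhile_cons]
        simp [pvIsSp, hc]

-- a word (maximal nonspace run) from prev_space=true adds (len, 1) and lands on false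
theorem pvFold_word (l : List String) (t g : Nat) (p : Bool)
    (hall : ∀ c ∈ l, c ≠ " ") (rest : List String) :
    (l ++ rest).foldl pvStep (t, g, p) =
      rest.foldl pvStep (t + l.length, (if p ∧ l ≠ [] then g + 1 else g),
        (if l = [] then p else false)) := by
  induction l generalizing t g p with
  | nil => simp
  | cons c tl ih =>
      have hc : c ≠ " " := hall c (by simp)
      simp only [List.cons_append, List.foldl_cons, pvStep, hc, ne_eq, not_false_iff, if_true,
        ite_true]
      rw [ih _ _ _ (fun x hx => hall x (List.mem_cons_of_mem _ hx))]
      cases p <;> by_cases htl : tl = [] <;> simp [htl, hc] <;> ring_nf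

-- spaces after a word flip prev_space back to true
theorem pvFold_spaces (l : List String) (t g : Nat) (p : Bool)
    (hall : ∀ c ∈ l, c = " ") (hne : l ≠ []) (rest : List String) :
    (l ++ rest).foldl pvStep (t, g, p) = rest.foldl pvStep (t, g, true) := by
  induction l generalizing p with
  | nil => exact absurd rfl hne
  | cons c tl ih =>
      have hc : c = " " := hall c (by simp)
      simp only [List.cons_append, List.foldl_cons, pvStep, hc, ne_eq, not_true, if_neg,
        not_false_iff, ite_true, ite_false, if_true, if_false]
      by_cases htl : tl = []
      · simp [htl]
      · exact ih true (fun x hx => hall x (List.mem_cons_of_mem _ hx)) htl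

-- heads after dropWhile/takeWhile
theorem pvDropWhile_head {α : Type} (p : α → Bool) (l : List α) (c : α) (t : List α)
    (h : l.dropWhile p = c :: t) : p c = false := by
  induction l with
  | nil => simp at h
  | cons a l ih =>
      rw [List.dropWhile_cons] at h
      by_cases ha : p a = true
      · exact ih (by simpa [ha] using h)
      · simp [ha] at h
        simp [← h.1, ha]

theorem pvTakeWhile_nil {α : Type} (p : α → Bool) (c : α) (t : List α)
    (h : (c :: t).takeWhile p = []) : p c = false := by
  rw [List.takeWhile_cons] at h
  by_cases hc : p c = true <;> simp [hc] at h ⊢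

-- the crux: B's count decomposes along A's loop structure
theorem pvBcnt_decomp (l : List String) :
    pvBcnt l =
      (((l.dropWhile pvIsSp).takeWhile (fun c => !pvIsSp c)).length
        + (if ((l.dropWhile pvIsSp).dropWhile (fun c => !pvIsSp c)).dropWhile pvIsSp ≠ []
           then 1 + pvBcnt (((l.dropWhile pvIsSp).dropWhile (fun c => !pvIsSp c)).dropWhile pvIsSp)
           else 0)) := by
  unfold pvBcnt
  rw [pvFold_dropSp]
  set l1 := l.dropWhile pvIsSp with hl1
  set word := l1.takeWhile (fun c => !pvIsSp c) with hword
  set mid := l1.dropWhile (fun c => !pvIsSp c) with hmid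
  set l2 := mid.dropWhile pvIsSp with hl2
  have hsplit : word ++ mid = l1 := List.takeWhile_append_dropWhile
  have hallw : ∀ c ∈ word, c ≠ " " := by
    intro c hc
    have := List.mem_takeWhile_imp hc
    simpa [pvIsSp] using this
  by_cases hnil : l1 = []
  · have hw : word = [] := by simp [hword, hnil]
    have hm : mid = [] := by simp [hmid, hnil]
    have h2 : l2 = [] := by simp [hl2, hm]
    simp [hnil, hw, h2]
  · obtain ⟨c1, t1, hcase⟩ := List.exists_cons_of_ne_nil hnil
    have hc1 : pvIsSp c1 = false := pvDropWhile_head _ _ _ _ (hl1 ▸ hcase)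
    have hw : word ≠ [] := by
      rw [hword, hcase, List.takeWhile_cons]
      simp [hc1]
    rw [← hsplit, pvFold_word _ _ _ _ hallw mid, if_pos ⟨rfl, hw⟩, if_neg hw]
    have hmid2 : mid.takeWhile pvIsSp ++ l2 = mid := List.takeWhile_append_dropWhile
    by_cases hmnil : mid = []
    · have h2 : l2 = [] := by simp [hl2, hmnil]
      simp [hmnil, h2]
    · obtain ⟨c2, t2, hm⟩ := List.exists_cons_of_ne_nil hmnil
      have hc2 : pvIsSp c2 = true := by
        have := pvDropWhile_head (fun c => !pvIsSp c) l1 c2 t2 (hmid ▸ hm)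
        simpa using this
      have hsp : mid.takeWhile pvIsSp ≠ [] := by
        rw [hm]
        intro hcon
        have := pvTakeWhile_nil pvIsSp c2 t2 hcon
        rw [hc2] at this; exact absurd this (by simp)
      have hallsp : ∀ c ∈ mid.takeWhile pvIsSp, c = " " := by
        intro c hc
        have := List.mem_takeWhile_imp hc
        simpa [pvIsSp] using this
      rw [← hmid2, pvFold_spaces _ _ _ _ hallsp hsp l2]
      by_cases h2nil : l2 = []
      · simp [h2nil]
      · obtain ⟨c3, t3, h2⟩ := List.exists_cons_of_ne_nil h2nil
        have hc3 : pvIsSp c3 = false := pvDropWhile_head _ _ _ _ (hl2 ▸ h2)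
        have hc3' : c3 ≠ " " := by simpa [pvIsSp] using hc3
        rw [h2]
        simp only [List.foldl_cons, pvStep, hc3', ne_eq, not_false_iff, if_true, ite_true]
        have hmono := pvFold_g_mono t3 1 1 false
        have hshift : List.foldl pvStep (0 + word.length + 1, 0 + 1 + 1, false) t3 =
            ((List.foldl pvStep (1, 1, false) t3).1 + word.length,
             (List.foldl pvStep (1, 1, false) t3).2.1 + 1,
             (List.foldl pvStep (1, 1, false) t3).2.2) := by
          have := pvFold_shift t3 word.length 1 1 1 false
          simpa [Nat.add_comm] using this
        rw [hshift]
        have hpos : ¬(c3 :: t3 : List String) = [] := by simp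
        rw [if_pos hpos]
        norm_num
        rcases hr : List.foldl pvStep (1, 1, false) t3 with ⟨rt, rg, rp⟩
        rw [hr] at hmono
        dsimp only at hmono ⊢
        omega

theorem pvBcnt_nil : pvBcnt [] = 0 := by simp [pvBcnt]

-- one outer iteration, expressed on the suffix list
theorem pvStepFacts (chars : List String) (w read : Nat) :
    (pvCopyWord chars w (pvSkipSp chars read)).1
      = w + (((chars.drop read).dropWhile pvIsSp).takeWhile (fun c => !pvIsSp c)).length
    ∧ chars.drop (pvSkipSp chars (pvCopyWord chars w (pvSkipSp chars read)).2)
      = (((chars.drop read).dropWhile pvIsSp).dropWhile (fun c => !pvIsSp c)).dropWhile pvIsSp := by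
  have hd1 := pvSkipSp_drop chars read
  have hcw := pvCopyWord_eq chars w (pvSkipSp chars read)
  have hdd : ∀ (a b : Nat), chars.drop (a + b) = (chars.drop a).drop b := by
    intro a b; rw [List.drop_drop]
  refine ⟨by rw [hcw]; simp [hd1], ?_⟩
  rw [pvSkipSp_drop, hcw]
  dsimp only
  rw [hdd, hd1, pvDrop_len_takeWhile]

-- one outer iteration strictly shrinks the unread suffix
theorem pvSuffix_lt (l : List String) (hne : l ≠ []) :
    ((((l.dropWhile pvIsSp).dropWhile (fun c => !pvIsSp c)).dropWhile pvIsSp)).length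
      < l.length := by
  obtain ⟨c, t, rfl⟩ := List.exists_cons_of_ne_nil hne
  by_cases hc : pvIsSp c = true
  · rw [List.dropWhile_cons, if_pos hc]
    calc ((((t.dropWhile pvIsSp).dropWhile (fun c => !pvIsSp c)).dropWhile pvIsSp)).length
        ≤ ((t.dropWhile pvIsSp).dropWhile (fun c => !pvIsSp c)).length :=
          List.length_dropWhile_le _ _
      _ ≤ (t.dropWhile pvIsSp).length := List.length_dropWhile_le _ _
      _ ≤ t.length := List.length_dropWhile_le _ _
      _ < (c :: t).length := by simp
  · rw [List.dropWhile_cons, if_neg (by simp [hc]), List.dropWhile_cons,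
      if_pos (by simp only [Bool.not_eq_true] at hc; simp [hc])]
    calc (((t.dropWhile (fun c => !pvIsSp c)).dropWhile pvIsSp)).length
        ≤ (t.dropWhile (fun c => !pvIsSp c)).length := List.length_dropWhile_le _ _
      _ ≤ t.length := List.length_dropWhile_le _ _
      _ < (c :: t).length := by simp

-- A's loop computes write + Bcnt of the unread suffix
theorem pvLoopGo_eq (chars : List String) (fuel w read : Nat)
    (hf : chars.length - read ≤ fuel) :
    pvLoopGo chars fuel w read = w + pvBcnt (chars.drop read) := by
  induction fuel generalizing w read with
  | zero =>
      have : chars.drop read = [] := List.drop_eq_nil_of_le (by omega)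
      simp [pvLoopGo, this, pvBcnt_nil]
  | succ fuel ih =>
      rw [pvLoopGo]
      by_cases h : read < chars.length
      · obtain ⟨hf1, hf2⟩ := pvStepFacts chars w read
        have hne : chars.drop read ≠ [] := by
          intro hcon
          have := List.length_drop (l := chars) (i := read)
          rw [hcon] at this; simp at this; omega
        have hlt := pvSuffix_lt (chars.drop read) hne
        rw [← hf2] at hlt
        have hlen3 : (chars.drop (pvSkipSp chars (pvCopyWord chars w
            (pvSkipSp chars read)).2)).length
            = chars.length - pvSkipSp chars (pvCopyWord chars w (pvSkipSp chars read)).2 :=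
          List.length_drop
        have hlenr : (chars.drop read).length = chars.length - read := List.length_drop
        have hfr : chars.length - pvSkipSp chars (pvCopyWord chars w
            (pvSkipSp chars read)).2 ≤ fuel := by omega
        by_cases h3 : pvSkipSp chars (pvCopyWord chars w (pvSkipSp chars read)).2
            < chars.length
        · have hne2 : (((chars.drop read).dropWhile pvIsSp).dropWhile
              (fun c => !pvIsSp c)).dropWhile pvIsSp ≠ [] := by
            rw [← hf2]
            intro hcon
            rw [hcon] at hlen3; simp at hlen3; omega
          simp only [h, if_pos, h3, if_true, ite_true]
          rw [ih _ _ hfr, pvBcnt_decomp (chars.drop read), if_pos hne2, hf1, hf2]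
          omega
        · have h2 : (((chars.drop read).dropWhile pvIsSp).dropWhile
              (fun c => !pvIsSp c)).dropWhile pvIsSp = [] := by
            rw [← hf2]; exact List.drop_eq_nil_of_le (by omega)
          simp only [h, if_pos, h3, if_neg, ite_false, if_true, ite_true]
          rw [ih _ _ hfr, pvBcnt_decomp (chars.drop read), if_neg (by simp [h2]), hf1,
            hf2, h2, pvBcnt_nil]
          omega
      · have : chars.drop read = [] := List.drop_eq_nil_of_le (by omega)
        simp [h, this, pvBcnt_nil]

-- ===== VERDICT (by name: the statement is the Claim_ definition above) =====
theorem compact_spaces_py_spec : Claim_equal_compact_spaces_py := by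
  intro chars _
  unfold Spec_compact_spaces_py compact_spaces_py
  rw [pvAlt_eq_Bcnt]
  have := pvLoopGo_eq chars chars.length 0 0 (by omega)
  simp at this
  exact_mod_cast this
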